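-- pv_equiv track=rewrite | github.com/MohsinAhmed-git/PRODIGY_CS_03 | checker.py | password_complexity
-- ===== SOURCE A (Python) =====
-- def password_complexity(password):
--   """
--   This function defines criteria for password complexity and counts the number of met criteria.
--
--   Args:
--       password: The password to be evaluated.
--
--   Returns:
--       An integer representing the number of complexity criteria met (0-5).
--   """
--   criteria = {
--       'length': len(password) >= 8,
--       'uppercase': any(char.isupper() for char in password),
--       'lowercase': any(char.islower() for char in password),
--       'digit': any(char.isdigit() for char in password),
--       'special': any(char in "!@#$%^&*()" for char in password)  # Add special character criteria
--   }
--
--   # Count the number of met criteria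
--   complexity_score = sum(criteria.values())
--
--   return complexity_score
-- ===== SOURCE B (Python) =====
-- def password_complexity(password):
--     has_upper = has_lower = has_digit = has_special = False
--     for char in password:
--         if char.isupper():
--             has_upper = True
--         elif char.islower():
--             has_lower = True
--         elif char.isdigit():
--             has_digit = True
--         elif char in "!@#$%^&*()":
--             has_special = True
--     return (int(len(password) >= 8) + int(has_upper) + int(has_lower)
--             + int(has_digit) + int(has_special))
-- ===== Notes on version B (the rewrite author's own statement) =====
-- stated objective: faster
-- what changed: Replaces the five-entry criteria dict (four independent any() generator scans summed via dict.values) with a single for-loop over the characters maintaining four boolean flags, the length criterion computed outside the loop.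
import Mathlib
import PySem

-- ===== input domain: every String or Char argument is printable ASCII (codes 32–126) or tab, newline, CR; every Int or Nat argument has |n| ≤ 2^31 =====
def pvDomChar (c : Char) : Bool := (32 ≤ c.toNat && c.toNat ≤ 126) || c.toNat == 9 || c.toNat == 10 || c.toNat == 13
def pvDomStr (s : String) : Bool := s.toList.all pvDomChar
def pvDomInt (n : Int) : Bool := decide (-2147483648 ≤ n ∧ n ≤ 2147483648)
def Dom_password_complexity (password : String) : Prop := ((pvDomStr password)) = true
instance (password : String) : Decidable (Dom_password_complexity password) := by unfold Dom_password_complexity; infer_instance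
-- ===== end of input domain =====

-- B replaces the five-entry criteria dict (four independent any() scans summed via dict.values)
-- by a single character loop maintaining four boolean flags; objective: alternative (single pass).


-- ===== PORT A =====
-- 'char in "!@#$%^&*()"' for a single char is list membership of the char
def pvSpecial (c : Char) : Bool := "!@#$%^&*()".toList.contains c

def password_complexity (password : String) : Int :=
  let chars := password.toList
  let criteria : PySem.Dict String Bool :=
    ((((PySem.Dict.empty.insert "length" (decide (PySem.Chars.len chars ≥ 8))).insert
        "uppercase" (chars.any PySem.Chars.isupper)).insert
        "lowercase" (chars.any PySem.Chars.islower)).insert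
        "digit" (chars.any PySem.Chars.isdigit)).insert
        "special" (chars.any pvSpecial)
  -- sum(criteria.values()) with bool values: True counts as 1
  criteria.values.foldl (fun acc b => acc + (if b then (1 : Int) else 0)) 0

-- ===== PORT B =====
def pvStep (f : Bool × Bool × Bool × Bool) (c : Char) : Bool × Bool × Bool × Bool :=
  if PySem.Chars.isupper c then (true, f.2.1, f.2.2.1, f.2.2.2)
  else if PySem.Chars.islower c then (f.1, true, f.2.2.1, f.2.2.2)
  else if PySem.Chars.isdigit c then (f.1, f.2.1, true, f.2.2.2)
  else if pvSpecial c then (f.1, f.2.1, f.2.2.1, true)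
  else f

def password_complexity_alt (password : String) : Int :=
  let flags := password.toList.foldl pvStep (false, false, false, false)
  (if PySem.Chars.len password.toList ≥ 8 then (1 : Int) else 0) +
  (if flags.1 then 1 else 0) + (if flags.2.1 then 1 else 0) +
  (if flags.2.2.1 then 1 else 0) + (if flags.2.2.2 then 1 else 0)

-- ===== PRECONDITION & SPEC =====
def Spec_password_complexity (password : String) (out : Int) : Prop := out = password_complexity_alt password
instance (password : String) (out : Int) : Decidable (Spec_password_complexity password out) := by unfold Spec_password_complexity; infer_instance

-- ===== CLAIM (what is proved, stated in full; the proofs are below) =====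
def Claim_equal_password_complexity : Prop := ∀ (password : String), Dom_password_complexity password → Spec_password_complexity password (password_complexity password)

-- ===== LEMMAS AND PROOFS =====

-- the four character classes are pairwise exclusive
theorem pv_upper_not_lower {c : Char} (h : PySem.Chars.isupper c = true) : PySem.Chars.islower c = false := by
  simp [PySem.Chars.isupper, PySem.Chars.islower, Char.le_def, UInt32.le_iff_toNat_le] at *
  omega

theorem pv_upper_not_digit {c : Char} (h : PySem.Chars.isupper c = true) : PySem.Chars.isdigit c = false := by
  simp [PySem.Chars.isupper, PySem.Chars.isdigit, Char.le_def, UInt32.le_iff_toNat_le] at *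
  omega

theorem pv_lower_not_digit {c : Char} (h : PySem.Chars.islower c = true) : PySem.Chars.isdigit c = false := by
  simp [PySem.Chars.islower, PySem.Chars.isdigit, Char.le_def, UInt32.le_iff_toNat_le] at *
  omega

theorem pv_lower_not_upper {c : Char} (h : PySem.Chars.islower c = true) : PySem.Chars.isupper c = false := by
  simp [PySem.Chars.isupper, PySem.Chars.islower, Char.le_def, UInt32.le_iff_toNat_le] at *
  omega

theorem pv_digit_not_upper {c : Char} (h : PySem.Chars.isdigit c = true) : PySem.Chars.isupper c = false := by
  simp [PySem.Chars.isupper, PySem.Chars.isdigit, Char.le_def, UInt32.le_iff_toNat_le] at *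
  omega

theorem pv_digit_not_lower {c : Char} (h : PySem.Chars.isdigit c = true) : PySem.Chars.islower c = false := by
  simp [PySem.Chars.islower, PySem.Chars.isdigit, Char.le_def, UInt32.le_iff_toNat_le] at *
  omega

theorem pv_special_not_upper {c : Char} (h : pvSpecial c = true) : PySem.Chars.isupper c = false := by
  simp [pvSpecial, List.contains_eq_mem] at h
  rcases h with h | h | h | h | h | h | h | h | h | h <;> subst h <;> decide

theorem pv_special_not_lower {c : Char} (h : pvSpecial c = true) : PySem.Chars.islower c = false := by
  simp [pvSpecial, List.contains_eq_mem] at h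
  rcases h with h | h | h | h | h | h | h | h | h | h <;> subst h <;> decide

theorem pv_special_not_digit {c : Char} (h : pvSpecial c = true) : PySem.Chars.isdigit c = false := by
  simp [pvSpecial, List.contains_eq_mem] at h
  rcases h with h | h | h | h | h | h | h | h | h | h <;> subst h <;> decide

theorem pv_upper_not_special {c : Char} (h : PySem.Chars.isupper c = true) : pvSpecial c = false := by
  cases hs : pvSpecial c
  · rfl
  · exact absurd h (by simp [pv_special_not_upper hs])

theorem pv_lower_not_special {c : Char} (h : PySem.Chars.islower c = true) : pvSpecial c = false := by
  cases hs : pvSpecial c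
  · rfl
  · exact absurd h (by simp [pv_special_not_lower hs])

theorem pv_digit_not_special {c : Char} (h : PySem.Chars.isdigit c = true) : pvSpecial c = false := by
  cases hs : pvSpecial c
  · rfl
  · exact absurd h (by simp [pv_special_not_digit hs])

-- the single-pass fold computes exactly the four any() scans
theorem pv_fold_flags (l : List Char) (a b c d : Bool) :
    l.foldl pvStep (a, b, c, d) =
      (a || l.any PySem.Chars.isupper, b || l.any PySem.Chars.islower,
       c || l.any PySem.Chars.isdigit, d || l.any pvSpecial) := by
  induction l generalizing a b c d with
  | nil => simp
  | cons x xs ih =>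
    simp only [List.foldl_cons, List.any_cons]
    by_cases hu : PySem.Chars.isupper x = true
    · rw [show pvStep (a, b, c, d) x = (true, b, c, d) from by simp [pvStep, hu], ih]
      simp [hu, pv_upper_not_lower hu, pv_upper_not_digit hu, pv_upper_not_special hu]
    · by_cases hl : PySem.Chars.islower x = true
      · rw [show pvStep (a, b, c, d) x = (a, true, c, d) from by simp [pvStep, hu, hl], ih]
        simp [hl, pv_lower_not_upper hl, pv_lower_not_digit hl, pv_lower_not_special hl]
      · by_cases hd : PySem.Chars.isdigit x = true
        · rw [show pvStep (a, b, c, d) x = (a, b, true, d) from by simp [pvStep, hu, hl, hd], ih]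
          simp [hd, pv_digit_not_upper hd, pv_digit_not_lower hd, pv_digit_not_special hd]
        · by_cases hs : pvSpecial x = true
          · rw [show pvStep (a, b, c, d) x = (a, b, c, true) from by simp [pvStep, hu, hl, hd, hs], ih]
            simp [hu, hl, hd, hs]
          · rw [show pvStep (a, b, c, d) x = (a, b, c, d) from by simp [pvStep, hu, hl, hd, hs], ih]
            simp [hu, hl, hd, hs]

-- ===== VERDICT (by name: the statement is the Claim_ definition above) =====
theorem password_complexity_spec : Claim_equal_password_complexity := by
  intro password _
  unfold Spec_password_complexity password_complexity password_complexity_alt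
  simp only [pv_fold_flags]
  simp [PySem.Dict.insert, PySem.Dict.empty, PySem.Dict.values, PySem.Dict.contains,
        List.foldl]
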